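-- pv_equiv track=rewrite | github.com/uc-cdis/cloud-automation | gen3/lib/fence/config-helper.py | _find_next_sibling_or_parent_position
-- ===== SOURCE A (Python) =====
-- def _find_next_sibling_or_parent_position(yaml_config_str, start, nested_level):
--     """
--     Find the position of the next non-child configuration in a YAML file string.
--     Assume comments are always above the configurations.
--
--     Args:
--         yaml_config_str (str): a string representing a full configuration file
--         start (integer): start position fo the key
--         nested_level (integer): nested level count
--     """
--     lines = yaml_config_str[start:].split("\n")
--     last_end_position = start
--     last_child_end_position = start
--     for line in lines:
--         is_comment = line.lstrip(' ').startswith("#")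
--         leading_spaces_cnt = len(line) - len(line.lstrip(' '))
--         is_child = (leading_spaces_cnt > nested_level * 2)
--         is_empty_line = (len(line.lstrip(' ')) == 0)
--         if not (is_empty_line or is_comment or is_child):
--             # If this line is not empty, not a comment, nor a child,
--             # then it means we found a non-child line!
--             # Just return the ending position of the
--             # last child (last_child_end_position)
--             break
--         else:
--             last_end_position += len(line) + 1 # plus one because "\n"
--             if is_child:
--                 last_child_end_position = last_end_position
--     return last_child_end_position
-- ===== SOURCE B (Python) =====
-- def _find_next_sibling_or_parent_position(yaml_config_str, start, nested_level):
--     # Two-phase: classify the skipped prefix first, then do the positional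
--     # arithmetic, instead of incrementally updating two running positions.
--     lines = yaml_config_str[start:].split("\n")
--     info = []
--     for line in lines:
--         stripped = line.lstrip(' ')
--         is_child = len(line) - len(stripped) > nested_level * 2
--         if stripped and not stripped.startswith("#") and not is_child:
--             break
--         info.append((len(line) + 1, is_child))
--     j = None
--     for i, (_, is_child) in enumerate(info):
--         if is_child:
--             j = i
--     if j is None:
--         return start
--     return start + sum(length for length, _ in info[:j + 1])
-- ===== Notes on version B (the rewrite author's own statement) =====
-- stated objective: alternative
-- what changed: Replaces A's single loop that incrementally maintains two running positions (last_end_position / last_child_end_position) with a two-phase decomposition: first classify the skipped prefix into (length+1, is_child) records, then locate the last child index and sum the lengths up to it.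
import Mathlib
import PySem

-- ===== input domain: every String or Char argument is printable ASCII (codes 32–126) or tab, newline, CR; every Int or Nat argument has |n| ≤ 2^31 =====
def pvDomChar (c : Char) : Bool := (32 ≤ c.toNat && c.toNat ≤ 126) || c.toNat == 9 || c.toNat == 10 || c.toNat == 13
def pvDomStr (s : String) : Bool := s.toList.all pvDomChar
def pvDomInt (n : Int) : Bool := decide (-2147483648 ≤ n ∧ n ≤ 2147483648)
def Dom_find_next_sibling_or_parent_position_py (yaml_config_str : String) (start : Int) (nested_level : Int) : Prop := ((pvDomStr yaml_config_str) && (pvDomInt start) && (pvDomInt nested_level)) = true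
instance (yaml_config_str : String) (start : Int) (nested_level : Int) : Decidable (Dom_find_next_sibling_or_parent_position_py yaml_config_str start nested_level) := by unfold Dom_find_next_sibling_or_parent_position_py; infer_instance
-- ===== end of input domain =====

-- B replaces A's single loop with two running positions by a two-phase pass
-- (classify the skipped prefix, then find the last child and sum lengths); alternative decomposition, same cost.


-- ===== PORT A =====
-- line.lstrip(' ') strips ONLY spaces: exact as dropWhile (· == ' ')
def pvLstripSp (l : List Char) : List Char := l.dropWhile (· == ' ')

-- the for-loop of A over the lines, carrying (last_end_position, last_child_end_position)
def pvLoopA (nested_level : Int) : List (List Char) → Int → Int → Int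
  | [], _, last_child_end_position => last_child_end_position
  | line :: rest, last_end_position, last_child_end_position =>
    let stripped := pvLstripSp line
    let is_comment := PySem.Chars.startswith stripped ['#']
    let leading_spaces_cnt : Int := (line.length : Int) - (stripped.length : Int)
    let is_child := leading_spaces_cnt > nested_level * 2
    let is_empty_line := stripped.length = 0
    if ¬ (is_empty_line ∨ is_comment = true ∨ is_child) then last_child_end_position
    else
      let last_end_position' := last_end_position + (line.length : Int) + 1
      pvLoopA nested_level rest last_end_position'
        (if is_child then last_end_position' else last_child_end_position)

def find_next_sibling_or_parent_position_py (yaml_config_str : String) (start : Int) (nested_level : Int) : Int :=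
  let lines := PySem.Chars.splitOn (PySem.List.slice yaml_config_str.toList (some start) none) ['\n']
  pvLoopA nested_level lines start start

-- ===== PORT B =====
-- phase 1 of B: the (len(line)+1, is_child) records of the skipped prefix (stops at the break line)
def pvInfoB (nested_level : Int) : List (List Char) → List (Int × Bool)
  | [] => []
  | line :: rest =>
    let stripped := pvLstripSp line
    let is_child := (line.length : Int) - (stripped.length : Int) > nested_level * 2
    if stripped ≠ [] ∧ PySem.Chars.startswith stripped ['#'] = false ∧ ¬ is_child then []
    else ((line.length : Int) + 1, decide is_child) :: pvInfoB nested_level rest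

def find_next_sibling_or_parent_position_py_alt (yaml_config_str : String) (start : Int) (nested_level : Int) : Int :=
  let lines := PySem.Chars.splitOn (PySem.List.slice yaml_config_str.toList (some start) none) ['\n']
  let info := pvInfoB nested_level lines
  let j := (PySem.List.enumerate info 0).foldl
    (fun j p => if p.2.2 then some p.1 else j) (none : Option Int)
  match j with
  | none => start
  | some j => start + ((PySem.List.slice info none (some (j + 1))).map (·.1)).sum

-- ===== PRECONDITION & SPEC =====
def Spec_find_next_sibling_or_parent_position_py (yaml_config_str : String) (start : Int) (nested_level : Int) (out : Int) : Prop := out = find_next_sibling_or_parent_position_py_alt yaml_config_str start nested_level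
instance (yaml_config_str : String) (start : Int) (nested_level : Int) (out : Int) : Decidable (Spec_find_next_sibling_or_parent_position_py yaml_config_str start nested_level out) := by unfold Spec_find_next_sibling_or_parent_position_py; infer_instance

-- ===== CLAIM (what is proved, stated in full; the proofs are below) =====
def Claim_equal_find_next_sibling_or_parent_position_py : Prop := ∀ (yaml_config_str : String) (start : Int) (nested_level : Int), Dom_find_next_sibling_or_parent_position_py yaml_config_str start nested_level → Spec_find_next_sibling_or_parent_position_py yaml_config_str start nested_level (find_next_sibling_or_parent_position_py yaml_config_str start nested_level)

-- ===== LEMMAS AND PROOFS =====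

-- index of the last child record in an info list (proof-side characterisation)
def pvLastC : List (Int × Bool) → Option Nat
  | [] => none
  | p :: rest =>
    match pvLastC rest with
    | some m => some (m + 1)
    | none => if p.2 then some 0 else none

-- B's fold over enumerate computes pvLastC (shifted by the enumeration offset)
lemma pvFold_eq_lastC (info : List (Int × Bool)) : ∀ (k : Int) (acc : Option Int),
    (PySem.List.enumerate info k).foldl (fun j p => if p.2.2 then some p.1 else j) acc
      = match pvLastC info with
        | none => acc
        | some m => some (k + (m : Int)) := by
  induction info with
  | nil => intro k acc; simp [PySem.List.enumerate, pvLastC]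
  | cons p rest ih =>
    intro k acc
    rw [PySem.List.enumerate_cons]
    simp only [List.foldl_cons]
    rw [ih (k + 1)]
    cases h : pvLastC rest with
    | none =>
      by_cases hc : p.2 <;> simp [pvLastC, h, hc]
    | some m =>
      simp only [pvLastC, h]
      push_cast
      ring_nf

-- A's loop equals the two-phase value computed from pvInfoB
lemma pvLoopA_eq (nl : Int) : ∀ (lines : List (List Char)) (le lce : Int),
    pvLoopA nl lines le lce
      = match pvLastC (pvInfoB nl lines) with
        | none => lce
        | some m => le + (((pvInfoB nl lines).take (m + 1)).map (·.1)).sum := by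
  intro lines
  induction lines with
  | nil => intro le lce; simp [pvLoopA, pvInfoB, pvLastC]
  | cons line rest ih =>
    intro le lce
    by_cases hbrk : (pvLstripSp line ≠ [] ∧
        PySem.Chars.startswith (pvLstripSp line) ['#'] = false ∧
        ¬ ((line.length : Int) - ((pvLstripSp line).length : Int) > nl * 2))
    · -- break line: A returns lce, info is []
      have hA : ¬ ((pvLstripSp line).length = 0 ∨
          PySem.Chars.startswith (pvLstripSp line) ['#'] = true ∨
          (line.length : Int) - ((pvLstripSp line).length : Int) > nl * 2) := by
        obtain ⟨h1, h2, h3⟩ := hbrk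
        push_neg
        exact ⟨by simpa [List.length_eq_zero_iff] using h1, by simpa using h2, not_lt.mp h3⟩
      simp only [pvLoopA, pvInfoB]
      rw [if_pos hA, if_pos hbrk]
      simp [pvLastC]
    · -- skipped line
      have hA : ((pvLstripSp line).length = 0 ∨
          PySem.Chars.startswith (pvLstripSp line) ['#'] = true ∨
          (line.length : Int) - ((pvLstripSp line).length : Int) > nl * 2) := by
        have hbrk' := hbrk
        push_neg at hbrk'
        by_cases h1 : pvLstripSp line = []
        · exact Or.inl (by simp [h1])
        by_cases h2 : PySem.Chars.startswith (pvLstripSp line) ['#'] = true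
        · exact Or.inr (Or.inl h2)
        · exact Or.inr (Or.inr (hbrk' h1 (by simpa using h2)))
      simp only [pvLoopA, pvInfoB]
      rw [if_neg (not_not_intro hA), if_neg hbrk]
      rw [ih]
      by_cases hc : (line.length : Int) - ((pvLstripSp line).length : Int) > nl * 2
      · cases h : pvLastC (pvInfoB nl rest) with
        | none => simp [pvLastC, h, hc, List.take]; ring
        | some m => simp [pvLastC, h, hc, List.take_succ_cons]; ring
      · cases h : pvLastC (pvInfoB nl rest) with
        | none => simp [pvLastC, h, hc]
        | some m => simp [pvLastC, h, hc, List.take_succ_cons]; ring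

-- ===== VERDICT (by name: the statement is the Claim_ definition above) =====
theorem find_next_sibling_or_parent_position_py_spec : Claim_equal_find_next_sibling_or_parent_position_py := by
  intro yaml_config_str start nested_level _
  unfold Spec_find_next_sibling_or_parent_position_py
  unfold find_next_sibling_or_parent_position_py find_next_sibling_or_parent_position_py_alt
  simp only []
  rw [pvLoopA_eq, pvFold_eq_lastC]
  cases h : pvLastC (pvInfoB nested_level
      (PySem.Chars.splitOn (PySem.List.slice yaml_config_str.toList (some start) none) ['\n'])) with
  | none => simp
  | some m =>
    simp only []
    have : ((0 : Int) + (m : Int)) + 1 = ((m + 1 : Nat) : Int) := by push_cast; ring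
    rw [this, PySem.List.slice_to_natCast]
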